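-- pv_equiv track=rewrite | github.com/berfinbastug/tapping_task_repo | data_frame_functions.py | check_consecutive_occurrences
-- ===== SOURCE A (Python) =====
-- def check_consecutive_occurrences(arr):
--     count = 1
--     for i in range(1, len(arr)):
--         if arr[i] == arr[i-1]:
--             count += 1
--             if count > 3:
--                 return False
--         else:
--             count = 1
--     return True
-- ===== SOURCE B (Python) =====
-- from itertools import groupby
--
-- def check_consecutive_occurrences(arr):
--     return all(sum(1 for _ in g) <= 3 for _, g in groupby(arr))
-- ===== Notes on version B (the rewrite author's own statement) =====
-- stated objective: idiomatic
-- what changed: Replaces the index loop with a running counter by itertools.groupby run-segmentation: split into maximal runs of equal elements and check each run length is at most 3.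
import Mathlib
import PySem

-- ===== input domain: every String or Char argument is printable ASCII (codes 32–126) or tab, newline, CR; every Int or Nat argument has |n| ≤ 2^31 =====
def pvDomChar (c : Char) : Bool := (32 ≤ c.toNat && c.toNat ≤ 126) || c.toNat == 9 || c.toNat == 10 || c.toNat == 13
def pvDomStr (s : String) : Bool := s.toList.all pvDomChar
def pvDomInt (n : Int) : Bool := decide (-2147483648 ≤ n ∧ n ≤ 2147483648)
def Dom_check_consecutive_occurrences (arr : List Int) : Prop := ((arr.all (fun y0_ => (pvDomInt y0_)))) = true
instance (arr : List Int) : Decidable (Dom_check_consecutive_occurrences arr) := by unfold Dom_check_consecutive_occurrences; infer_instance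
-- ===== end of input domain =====

-- B segments the list into maximal runs (itertools.groupby) and checks every run length ≤ 3,
-- instead of A's running counter over indices; objective: idiomatic (same cost).

-- ===== PORT A =====
-- A's loop over i = 1..len-1 keeping (count, previous element), with an early return False.
def pvALoop (prev : Int) (count : Int) : List Int → Bool
  | [] => true
  | x :: xs =>
      if x == prev then
        if count + 1 > 3 then false else pvALoop x (count + 1) xs
      else pvALoop x 1 xs

def check_consecutive_occurrences (arr : List Int) : Bool :=
  match arr with
  | [] => true
  | x :: xs => pvALoop x 1 xs

-- ===== PORT B =====
-- groupby: maximal runs of consecutive equal elements.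
def pvGroupby : List Int → List (List Int)
  | [] => []
  | x :: xs => (x :: xs.takeWhile (· == x)) :: pvGroupby (xs.dropWhile (· == x))
termination_by l => l.length
decreasing_by
  simp only [List.length_cons]
  exact Nat.lt_succ_of_le (List.length_dropWhile_le _ _)

def check_consecutive_occurrences_alt (arr : List Int) : Bool :=
  (pvGroupby arr).all (fun g => g.length ≤ 3)

-- ===== PRECONDITION & SPEC =====
def Spec_check_consecutive_occurrences (arr : List Int) (out : Bool) : Prop := out = check_consecutive_occurrences_alt arr
instance (arr : List Int) (out : Bool) : Decidable (Spec_check_consecutive_occurrences arr out) := by unfold Spec_check_consecutive_occurrences; infer_instance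

-- ===== CLAIM (what is proved, stated in full; the proofs are below) =====
def Claim_equal_check_consecutive_occurrences : Prop := ∀ (arr : List Int), Dom_check_consecutive_occurrences arr → Spec_check_consecutive_occurrences arr (check_consecutive_occurrences arr)

-- ===== LEMMAS AND PROOFS =====

theorem pvGroupby_nil : pvGroupby [] = [] := by
  rw [pvGroupby.eq_def]

theorem pvGroupby_cons (x : Int) (xs : List Int) :
    pvGroupby (x :: xs) = (x :: xs.takeWhile (· == x)) :: pvGroupby (xs.dropWhile (· == x)) := by
  rw [pvGroupby.eq_def]

theorem pvALoop_eq (xs : List Int) : ∀ (prev : Int) (c : Int), 1 ≤ c → c ≤ 3 →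
    pvALoop prev c xs =
      (decide ((xs.takeWhile (· == prev)).length ≤ (3 - c).toNat)
        && (pvGroupby (xs.dropWhile (· == prev))).all (fun g => g.length ≤ 3)) := by
  induction xs with
  | nil =>
      intro prev c h1 h3
      simp [pvALoop, pvGroupby]
  | cons x xs ih =>
      intro prev c h1 h3
      by_cases hx : x = prev
      · subst hx
        simp only [pvALoop, beq_self_eq_true, if_true, List.takeWhile, List.dropWhile]
        by_cases hc : c + 1 > 3
        · have hc3 : c = 3 := by omega
          subst hc3
          simp
        · simp only [if_neg hc]
          rw [ih x (c + 1) (by omega) (by omega)]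
          have hlen : ((3 : Int) - (c + 1)).toNat + 1 = ((3 : Int) - c).toNat := by omega
          congr 1
          simp only [List.length_cons]
          simp only [decide_eq_decide]
          omega
      · have hbeq : (x == prev) = false := by simp [hx]
        simp only [pvALoop, hbeq, List.takeWhile, List.dropWhile,
          Bool.false_eq_true, if_false]
        rw [ih x 1 (by omega) (by omega), pvGroupby_cons]
        simp only [List.all_cons, List.length_cons, List.length_nil, Nat.zero_le, decide_true,
          Bool.true_and]
        congr 1
        simp only [decide_eq_decide]
        omega

theorem check_consecutive_occurrences_spec : Claim_equal_check_consecutive_occurrences := by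
  intro arr _
  unfold Spec_check_consecutive_occurrences
  cases arr with
  | nil => simp [check_consecutive_occurrences, check_consecutive_occurrences_alt, pvGroupby_nil]
  | cons x xs =>
      show pvALoop x 1 xs = check_consecutive_occurrences_alt (x :: xs)
      rw [pvALoop_eq xs x 1 (by omega) (by omega)]
      unfold check_consecutive_occurrences_alt
      rw [pvGroupby_cons]
      simp only [List.all_cons, List.length_cons]
      congr 1
      simp only [decide_eq_decide]
      omega
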